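-- pv_equiv track=rewrite | github.com/ImFlashh/my_twitter | hack_power_optional.py | hack_calculator
-- ===== SOURCE A (Python) =====
-- def hack_calculator(hack, letters, phrases):
--     result = 0
--     multiply = {}  # słownik do zapisywania ilości wystąpień litery w hack
--
--     for letter in hack:
--         if letter not in multiply:
--             multiply[letter] = 1
--         else:
--             multiply[letter] += 1
--         result += letters[letter] * multiply[letter]
--
--     phrases_sorted = sorted(phrases, reverse=True)  # posortowane 'bonusy' wg wartości malejąco
--     for phrase in phrases_sorted:
--         if phrase in hack:
--             result += phrases[phrase]
--             hack = hack.replace(phrase, '')  # wycinam bonusy, które już wystąpiły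
--
--     return result
-- ===== SOURCE B (Python) =====
-- def hack_calculator(hack, letters, phrases):
--     counts = {}
--     for ch in hack:
--         counts[ch] = counts.get(ch, 0) + 1
--     result = sum(letters[ch] * (k * (k + 1) // 2) for ch, k in counts.items())
--     for phrase in sorted(phrases, reverse=True):
--         if phrase in hack:
--             result += phrases[phrase]
--             hack = hack.replace(phrase, '')
--     return result
-- ===== Notes on version B (the rewrite author's own statement) =====
-- stated objective: simpler
-- what changed: Phase 1's running-multiplier accumulation (a dict of counts updated while summing letters[c]*multiply[c] per character) is replaced by building the character counts in one pass and summing the closed form letters[c]*k*(k+1)//2 per distinct letter; the phrase-bonus phase is unchanged.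
import Mathlib
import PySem

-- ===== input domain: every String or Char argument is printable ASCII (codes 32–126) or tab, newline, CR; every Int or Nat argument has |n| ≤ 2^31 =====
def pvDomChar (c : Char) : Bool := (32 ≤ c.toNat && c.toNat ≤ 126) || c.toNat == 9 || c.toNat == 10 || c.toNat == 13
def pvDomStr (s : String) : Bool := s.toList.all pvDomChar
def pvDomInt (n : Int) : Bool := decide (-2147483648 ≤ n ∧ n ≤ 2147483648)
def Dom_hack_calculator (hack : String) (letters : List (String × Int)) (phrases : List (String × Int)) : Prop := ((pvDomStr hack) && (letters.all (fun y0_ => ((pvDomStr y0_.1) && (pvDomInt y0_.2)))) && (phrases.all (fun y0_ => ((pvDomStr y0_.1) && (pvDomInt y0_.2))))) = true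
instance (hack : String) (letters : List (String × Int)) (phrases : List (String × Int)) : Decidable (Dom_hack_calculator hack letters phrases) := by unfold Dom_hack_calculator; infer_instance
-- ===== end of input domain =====

-- B replaces A's running-multiplier letter loop by a count-then-triangular-closed-form pass
-- (letters[c] * k*(k+1)//2 per distinct letter); the phrase-bonus phase is unchanged. Objective: simpler.

-- Phase 2 of BOTH Pythons is the identical sorted-descending phrase scan with replace; one shared helper.
def pvBonus (P : PySem.Dict String Int) (hack : String) (base : Int) : Int :=
  ((PySem.List.sorted P.keys (fun x => x) true).foldl
    (fun (st : String × Int) phrase =>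
      if PySem.Str.isIn phrase st.1 then (PySem.Str.replace st.1 phrase "", st.2 + P.getD phrase 0)
      else st)
    (hack, base)).2

-- ===== PORT A =====
def hack_calculator (hack : String) (letters : List (String × Int)) (phrases : List (String × Int)) : Int :=
  let L := PySem.Dict.ofList letters
  -- result = 0; multiply = {}; for letter in hack: … (letters[letter] is total under Pre_, ported as getD _ 0)
  let p1 := hack.toList.foldl
    (fun (st : PySem.Dict Char Int × Int) c =>
      let m := if st.1.contains c = false then st.1.insert c 1 else st.1.modify c 0 (· + 1)
      (m, st.2 + L.getD (String.singleton c) 0 * m.getD c 0))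
    (PySem.Dict.empty, 0)
  pvBonus (PySem.Dict.ofList phrases) hack p1.2

-- ===== PORT B =====
def hack_calculator_alt (hack : String) (letters : List (String × Int)) (phrases : List (String × Int)) : Int :=
  let L := PySem.Dict.ofList letters
  -- counts = {}; for ch in hack: counts[ch] = counts.get(ch, 0) + 1
  let counts := hack.toList.foldl (fun d c => d.insert c (d.getD c 0 + 1)) PySem.Dict.empty
  -- result = sum(letters[ch] * (k * (k + 1) // 2) for ch, k in counts.items())
  let base := (counts.items.map
    (fun p => L.getD (String.singleton p.1) 0 * PySem.Int.floordiv (p.2 * (p.2 + 1)) 2)).sum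
  pvBonus (PySem.Dict.ofList phrases) hack base

-- ===== PRECONDITION & SPEC =====
-- Pre_ excludes exactly the inputs where the Python A raises KeyError: a character of hack whose
-- one-character string is not a key of letters (B raises there too).
def Pre_hack_calculator (hack : String) (letters : List (String × Int)) (phrases : List (String × Int)) : Prop :=
  (hack.toList.all (fun c => letters.any (fun p => p.1 == String.singleton c))) = true
instance (hack : String) (letters : List (String × Int)) (phrases : List (String × Int)) : Decidable (Pre_hack_calculator hack letters phrases) := by unfold Pre_hack_calculator; infer_instance
def pvWitness_hack_calculator : String × (List (String × Int)) × (List (String × Int)) :=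
  ("abba", [("a", 2), ("b", -1)], [("ab", 5), ("ba", 3)])
def Spec_hack_calculator (hack : String) (letters : List (String × Int)) (phrases : List (String × Int)) (out : Int) : Prop := out = hack_calculator_alt hack letters phrases
instance (hack : String) (letters : List (String × Int)) (phrases : List (String × Int)) (out : Int) : Decidable (Spec_hack_calculator hack letters phrases out) := by unfold Spec_hack_calculator; infer_instance

-- ===== CLAIM (what is proved, stated in full; the proofs are below) =====
def Claim_equal_hack_calculator : Prop := ∀ (hack : String) (letters : List (String × Int)) (phrases : List (String × Int)), Dom_hack_calculator hack letters phrases → Pre_hack_calculator hack letters phrases → Spec_hack_calculator hack letters phrases (hack_calculator hack letters phrases)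

-- ===== LEMMAS AND PROOFS =====

-- triangular number 1 + 2 + … + n, as an Int
def pvT (n : Nat) : Int := ((n * (n + 1) / 2 : Nat) : Int)

theorem pvT_succ (n : Nat) : pvT (n + 1) = pvT n + (n + 1 : Nat) := by
  unfold pvT
  obtain ⟨r, hr⟩ := Nat.even_mul_succ_self n
  have hx : (n + 1) * (n + 1 + 1) = n * (n + 1) + 2 * (n + 1) := by ring
  have h : (n + 1) * (n + 1 + 1) / 2 = n * (n + 1) / 2 + (n + 1) := by omega
  rw [h]; push_cast; ring

-- A's dict update is exactly Counter's modify step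
theorem pvStepA_dict (d : PySem.Dict Char Int) (c : Char) :
    (if d.contains c = false then d.insert c 1 else d.modify c 0 (· + 1)) = d.modify c 0 (· + 1) := by
  by_cases h : d.contains c = false
  · simp only [h, if_true]
    apply PySem.Dict.ext
    simp [PySem.Dict.insert, PySem.Dict.modify, h, PySem.Dict.getD_of_not_contains d 0 h]
  · simp [h]

-- the dict component of A's loop, ignoring the accumulator
theorem pvFold_fst (w : Char → Int) :
    ∀ (l : List Char) (d : PySem.Dict Char Int) (a : Int),
    (l.foldl
      (fun (st : PySem.Dict Char Int × Int) c =>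
        let m := st.1.modify c 0 (· + 1)
        (m, st.2 + w c * m.getD c 0)) (d, a)).1
      = l.foldl (fun d c => d.modify c 0 (· + 1)) d := by
  intro l
  induction l with
  | nil => intro d a; rfl
  | cons x xs ih => intro d a; simp only [List.foldl_cons]; exact ih _ _

-- sums over a Nodup list whose summands agree off one element c
theorem pvSum_single {f g : Char → Int} :
    ∀ (ks : List Char), ks.Nodup → ∀ c ∈ ks, (∀ k ∈ ks, k ≠ c → f k = g k) →
    (ks.map f).sum = (ks.map g).sum + (f c - g c) := by
  intro ks
  induction ks with
  | nil => intro _ c hc; simp at hc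
  | cons x xs ih =>
    intro hnd c hc hfg
    rcases List.mem_cons.mp hc with rfl | hc'
    · have : ∀ k ∈ xs, f k = g k := by
        intro k hk
        exact hfg k (List.mem_cons_of_mem _ hk) (by rintro rfl; exact (List.nodup_cons.mp hnd).1 hk)
      simp only [List.map_cons, List.sum_cons]
      rw [List.map_congr_left this]; ring
    · have hx : f x = g x := hfg x (List.mem_cons_self) (by rintro rfl; exact (List.nodup_cons.mp hnd).1 hc')
      simp only [List.map_cons, List.sum_cons]
      rw [ih (List.nodup_cons.mp hnd).2 c hc' (fun k hk => hfg k (List.mem_cons_of_mem _ hk)), hx]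
      ring

-- the closed-form sum grows by w c * (count c + 1) when c is appended
theorem pvSetSum_append (w : Char → Int) (t : List Char) (c : Char) :
    ((PySem.Set.ofList (t ++ [c])).map (fun k => w k * pvT ((t ++ [c]).count k))).sum
      = ((PySem.Set.ofList t).map (fun k => w k * pvT (t.count k))).sum + w c * (t.count c + 1) := by
  have hcnt : ∀ k : Char, (t ++ [c]).count k = t.count k + if k = c then 1 else 0 := by
    intro k
    rw [List.count_append]
    by_cases hk : k = c <;> simp [hk, Ne.symm]
  rw [PySem.Set.ofList_append_singleton]
  by_cases hmem : c ∈ t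
  · rw [PySem.Set.add_of_mem ((PySem.Set.mem_ofList _ _).mpr hmem)]
    have hc' : c ∈ PySem.Set.ofList t := (PySem.Set.mem_ofList _ _).mpr hmem
    rw [pvSum_single _ (PySem.Set.nodup_ofList t) c hc'
        (fun k _ hk => by rw [hcnt k, if_neg hk, Nat.add_zero])]
    have : w c * pvT ((t ++ [c]).count c) - w c * pvT (t.count c) = w c * (t.count c + 1) := by
      rw [hcnt c, if_pos rfl, pvT_succ]; push_cast; ring
    rw [this]
  · rw [PySem.Set.add_of_not_mem (by simp [PySem.Set.mem_ofList, hmem])]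
    rw [List.map_append, List.sum_append]
    have h1 : ((PySem.Set.ofList t).map (fun k => w k * pvT ((t ++ [c]).count k))).sum
        = ((PySem.Set.ofList t).map (fun k => w k * pvT (t.count k))).sum := by
      apply congrArg
      apply List.map_congr_left
      intro k hk
      have : k ≠ c := by rintro rfl; exact hmem ((PySem.Set.mem_ofList _ _).mp hk)
      simp [hcnt k, this]
    have h2 : t.count c = 0 := List.count_eq_zero.mpr hmem
    rw [h1]
    simp [h2, pvT]

-- A's phase-1 loop computes the closed-form sum of B
theorem pvPhase1 (w : Char → Int) (l : List Char) :
    (l.foldl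
      (fun (st : PySem.Dict Char Int × Int) c =>
        let m := st.1.modify c 0 (· + 1)
        (m, st.2 + w c * m.getD c 0)) (PySem.Dict.empty, 0)).2
      = ((PySem.Set.ofList l).map (fun k => w k * pvT (l.count k))).sum := by
  induction l using List.reverseRecOn with
  | nil => simp [PySem.Set.ofList]
  | append_singleton t c ih =>
    rw [List.foldl_append, List.foldl_cons, List.foldl_nil]
    simp only []
    rw [pvSetSum_append]
    have hfst := pvFold_fst w t PySem.Dict.empty 0
    have hcounter : t.foldl (fun d c => d.modify c 0 (· + 1)) PySem.Dict.empty = PySem.Dict.counter t :=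
      (PySem.Dict.counter_eq_foldl t).symm
    rw [hfst, hcounter]
    rw [PySem.Dict.getD_modify_self, PySem.Dict.getD_counter, ih]

-- B's base sum in terms of pvT
theorem pvBase_eq (w : Char → Int) (l : List Char) :
    ((l.foldl (fun d c => d.insert c (d.getD c 0 + 1)) PySem.Dict.empty).items.map
        (fun p => w p.1 * PySem.Int.floordiv (p.2 * (p.2 + 1)) 2)).sum
      = ((PySem.Set.ofList l).map (fun k => w k * pvT (l.count k))).sum := by
  rw [PySem.Dict.foldl_insert_getD_add_one_eq_counter, PySem.Dict.items_counter, List.map_map]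
  apply congrArg
  apply List.map_congr_left
  intro k _
  simp only [Function.comp]
  have : ((l.count k : Int)) * ((l.count k : Int) + 1) = ((l.count k * (l.count k + 1) : Nat) : Int) := by
    push_cast; ring
  rw [this]
  have h2 : PySem.Int.floordiv ((l.count k * (l.count k + 1) : Nat) : Int) 2
      = ((l.count k * (l.count k + 1) / 2 : Nat) : Int) := by
    exact_mod_cast PySem.Int.floordiv_natCast (l.count k * (l.count k + 1)) 2
  rw [h2]
  rfl

-- ===== VERDICT (by name: the statement is the Claim_ definition above) =====
theorem hack_calculator_spec : Claim_equal_hack_calculator := by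
  intro hack letters phrases _ _
  unfold Spec_hack_calculator hack_calculator hack_calculator_alt
  simp only [pvStepA_dict]
  rw [pvPhase1]
  congr 1
  exact (pvBase_eq _ _).symm
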